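-- pv_equiv track=rewrite | github.com/nmiculinic/minion-basecaller | src/bioinf_utils.py | cigar_str_to_pairs
-- ===== SOURCE A (Python) =====
-- CIGAR_OPERATIONS = 'MIDNSHP=X'
--
-- def cigar_str_to_pairs(cigar):
--     split_locations = []
--     for i, c in enumerate(cigar):
--         if c in CIGAR_OPERATIONS:
--             split_locations.append(i)
--
--     cigar_pairs = []
--     for i, end in enumerate(split_locations):
--         start = split_locations[i-1] + 1 if i > 0 else 0
--
--         cnt = int(cigar[start:end])
--         char = cigar[end].upper()
--         cigar_pairs.append((char, cnt))
--     return cigar_pairs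
-- ===== SOURCE B (Python) =====
-- CIGAR_OPERATIONS = 'MIDNSHP=X'
--
-- def cigar_str_to_pairs(cigar):
--     cigar_pairs = []
--     buffer = ''
--     for c in cigar:
--         if c in CIGAR_OPERATIONS:
--             cigar_pairs.append((c.upper(), int(buffer)))
--             buffer = ''
--         else:
--             buffer += c
--     return cigar_pairs
-- ===== Notes on version B (the rewrite author's own statement) =====
-- stated objective: simpler
-- what changed: Replaces A's two-pass parser (collect operator indices, then slice the string between consecutive indices) by a single pass that accumulates a running count buffer and flushes it at each operator.
import Mathlib
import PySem

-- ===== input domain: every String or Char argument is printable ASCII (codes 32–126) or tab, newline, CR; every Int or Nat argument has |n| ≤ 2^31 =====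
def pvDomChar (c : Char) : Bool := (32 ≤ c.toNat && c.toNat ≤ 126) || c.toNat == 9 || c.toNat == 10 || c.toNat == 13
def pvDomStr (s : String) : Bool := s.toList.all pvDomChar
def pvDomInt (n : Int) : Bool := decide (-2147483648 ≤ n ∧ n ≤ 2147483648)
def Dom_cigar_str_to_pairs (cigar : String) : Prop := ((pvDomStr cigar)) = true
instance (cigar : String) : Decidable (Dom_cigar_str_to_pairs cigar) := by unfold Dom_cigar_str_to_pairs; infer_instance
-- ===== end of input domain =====

-- B replaces A's two-pass index-collection-and-slicing parser by a single pass with a running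
-- count buffer (objective: simpler); return values agree on every input where Python A returns.

def CIGAR_OPERATIONS : String := "MIDNSHP=X"

-- ===== PORT A =====
def cigar_str_to_pairs (cigar : String) : List (String × Int) :=
  let cs := cigar.toList
  let split_locations : List Int :=
    (PySem.List.enumerate cs).foldl
      (fun acc ic => if PySem.Chars.isIn [ic.2] CIGAR_OPERATIONS.toList then acc ++ [ic.1] else acc) []
  (PySem.List.enumerate split_locations).foldl
    (fun acc ie =>
      let start : Int := if 0 < ie.1 then PySem.List.pyGetD split_locations (ie.1 - 1) 0 + 1 else 0
      let cnt : Int := (PySem.Int.ofChars? (PySem.List.slice cs (some start) (some ie.2))).getD 0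
      let ch : String := String.ofList (PySem.Chars.upper [PySem.List.pyGetD cs ie.2 ' '])
      acc ++ [(ch, cnt)]) []

-- ===== PORT B =====
def cigar_str_to_pairs_alt (cigar : String) : List (String × Int) :=
  (cigar.toList.foldl
    (fun st c =>
      if PySem.Chars.isIn [c] CIGAR_OPERATIONS.toList then
        (st.1 ++ [(String.ofList (PySem.Chars.upper [c]), (PySem.Int.ofChars? st.2).getD 0)], ([] : List Char))
      else
        (st.1, st.2 ++ [c]))
    (([], []) : List (String × Int) × List Char)).1

-- ===== PRECONDITION & SPEC =====
-- the runs of characters standing before each CIGAR operator (trailing characters ignored)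
def pvCountRuns : List Char → List Char → List (List Char)
  | _, [] => []
  | buf, c :: rest =>
    if PySem.Chars.isIn [c] CIGAR_OPERATIONS.toList then buf :: pvCountRuns [] rest
    else pvCountRuns (buf ++ [c]) rest

-- Pre_ excludes exactly the inputs on which Python A raises ValueError: some run of characters
-- standing before a CIGAR operator does not parse as a Python int.
def Pre_cigar_str_to_pairs (cigar : String) : Prop :=
  ∀ seg ∈ pvCountRuns [] cigar.toList, PySem.Int.ofChars? seg ≠ none
instance (cigar : String) : Decidable (Pre_cigar_str_to_pairs cigar) := by
  unfold Pre_cigar_str_to_pairs; infer_instance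

def pvWitness_cigar_str_to_pairs : String := "10M2I3X"

def Spec_cigar_str_to_pairs (cigar : String) (out : List (String × Int)) : Prop := out = cigar_str_to_pairs_alt cigar
instance (cigar : String) (out : List (String × Int)) : Decidable (Spec_cigar_str_to_pairs cigar out) := by unfold Spec_cigar_str_to_pairs; infer_instance

-- ===== CLAIM (what is proved, stated in full; the proofs are below) =====
def Claim_equal_cigar_str_to_pairs : Prop := ∀ (cigar : String), Dom_cigar_str_to_pairs cigar → Pre_cigar_str_to_pairs cigar → Spec_cigar_str_to_pairs cigar (cigar_str_to_pairs cigar)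

-- ===== LEMMAS AND PROOFS =====

-- common recursive description of the parse (used only in the proofs)
def pvParse : List Char → List Char → List (String × Int)
  | _, [] => []
  | buf, c :: rest =>
    if PySem.Chars.isIn [c] CIGAR_OPERATIONS.toList then
      (String.ofList (PySem.Chars.upper [c]), (PySem.Int.ofChars? buf).getD 0) :: pvParse [] rest
    else pvParse (buf ++ [c]) rest

-- B's fold equals pvParse
theorem alt_eq_parse (cs : List Char) : ∀ (buf : List Char) (acc : List (String × Int)),
    (cs.foldl
      (fun st c =>
        if PySem.Chars.isIn [c] CIGAR_OPERATIONS.toList then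
          (st.1 ++ [(String.ofList (PySem.Chars.upper [c]), (PySem.Int.ofChars? st.2).getD 0)], ([] : List Char))
        else
          (st.1, st.2 ++ [c])) (acc, buf)).1 = acc ++ pvParse buf cs := by
  induction cs with
  | nil => intro buf acc; simp [pvParse]
  | cons c rest ih =>
    intro buf acc
    by_cases h : PySem.Chars.isIn [c] CIGAR_OPERATIONS.toList
    · simp [List.foldl_cons, h, pvParse, ih]
    · simp [List.foldl_cons, h, pvParse, ih]

-- the split locations of A, recursively with an offset
def pvLocs : Int → List Char → List Int
  | _, [] => []
  | off, c :: rest =>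
    if PySem.Chars.isIn [c] CIGAR_OPERATIONS.toList then off :: pvLocs (off + 1) rest
    else pvLocs (off + 1) rest

theorem locs_eq (cs : List Char) : ∀ (off : Int),
    ((PySem.List.enumerate cs off).filter
        (fun ic => PySem.Chars.isIn [ic.2] CIGAR_OPERATIONS.toList)).map (·.1) = pvLocs off cs := by
  induction cs with
  | nil => intro off; simp [PySem.List.enumerate_nil, pvLocs]
  | cons c rest ih =>
    intro off
    by_cases h : PySem.Chars.isIn [c] CIGAR_OPERATIONS.toList
    · simp [PySem.List.enumerate_cons, h, pvLocs, ih]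
    · simp [PySem.List.enumerate_cons, h, pvLocs, ih]

-- A's second loop, recursively over the remaining locations
def pvH (full : List Char) : Int → List Int → List (String × Int)
  | _, [] => []
  | prev, e :: es =>
    (String.ofList (PySem.Chars.upper [PySem.List.pyGetD full e ' ']),
     (PySem.Int.ofChars? (PySem.List.slice full (some prev) (some e))).getD 0) :: pvH full (e + 1) es

theorem pairs_loop_eq_pvH (full : List Char) (L0 : List Int) :
    ∀ (tail : List Int) (k : Nat), L0.drop k = tail →
    (PySem.List.enumerate tail (k : Int)).map
      (fun ie =>
        (String.ofList (PySem.Chars.upper [PySem.List.pyGetD full ie.2 ' ']),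
         (PySem.Int.ofChars? (PySem.List.slice full
            (some (if 0 < ie.1 then PySem.List.pyGetD L0 (ie.1 - 1) 0 + 1 else 0)) (some ie.2))).getD 0))
    = pvH full (if 0 < (k : Int) then PySem.List.pyGetD L0 ((k : Int) - 1) 0 + 1 else 0) tail := by
  intro tail
  induction tail with
  | nil => intro k hk; simp [PySem.List.enumerate_nil, pvH]
  | cons e es ih =>
    intro k hk
    have he : L0[k]? = some e := by
      have : (L0.drop k)[0]? = some e := by rw [hk]; rfl
      simpa using this
    have hgetD : PySem.List.pyGetD L0 (k : Int) 0 = e := by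
      simp [PySem.List.pyGetD_natCast, List.getD, he]
    have hdrop : L0.drop (k + 1) = es := by
      rw [← List.tail_drop, hk]; rfl
    have ihk := ih (k + 1) hdrop
    rw [PySem.List.enumerate_cons, List.map_cons]
    have hcast : ((k : Int) + 1) = (((k + 1 : Nat)) : Int) := by push_cast; ring
    rw [hcast, ihk]
    have hpos : 0 < ((k + 1 : Nat) : Int) := by positivity
    simp only [hpos, if_pos]
    have h1 : ((k + 1 : Nat) : Int) - 1 = (k : Int) := by push_cast; ring
    rw [h1, hgetD, pvH]

theorem slice_self (full : List Char) (a : Nat) :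
    PySem.List.slice full (some (a : Int)) (some (a : Int)) = [] := by
  rw [PySem.List.slice_natCast]; simp

theorem pvH_eq_parse (full : List Char) :
    ∀ (rest : List Char) (off prev : Nat), prev ≤ off → full.drop off = rest →
    pvH full (prev : Int) (pvLocs (off : Int) rest)
      = pvParse (PySem.List.slice full (some (prev : Int)) (some (off : Int))) rest := by
  intro rest
  induction rest with
  | nil => intro off prev _ _; simp [pvLocs, pvH, pvParse]
  | cons c rest' ih =>
    intro off prev hle hdrop
    have hc : full[off]? = some c := by
      have : (full.drop off)[0]? = some c := by rw [hdrop]; rfl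
      simpa using this
    have hdrop' : full.drop (off + 1) = rest' := by
      rw [← List.tail_drop, hdrop]; rfl
    by_cases h : PySem.Chars.isIn [c] CIGAR_OPERATIONS.toList
    · have hget : PySem.List.pyGetD full (off : Int) ' ' = c := by
        simp [PySem.List.pyGetD_natCast, List.getD, hc]
      have ih' := ih (off + 1) (off + 1) le_rfl hdrop'
      rw [slice_self] at ih'
      simp only [pvLocs, h, if_pos, pvH, pvParse, hget]
      have hcast : ((off : Int) + 1) = (((off + 1 : Nat)) : Int) := by push_cast; ring
      rw [hcast, ih']
    · have hslice : PySem.List.slice full (some (prev : Int)) (some ((off + 1 : Nat) : Int))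
          = PySem.List.slice full (some (prev : Int)) (some (off : Int)) ++ [c] := by
        rw [PySem.List.slice_natCast, PySem.List.slice_natCast]
        have h1 : off + 1 - prev = (off - prev) + 1 := by omega
        rw [h1, List.take_add_one]
        congr 1
        have : (full.drop prev)[off - prev]? = full[prev + (off - prev)]? := by
          simp [List.getElem?_drop]
        rw [Nat.add_sub_cancel' hle] at this
        simp [this, hc]
    -- not an operator: buffer grows by c
      have ih' := ih (off + 1) prev (by omega) hdrop'
      have hcast : ((off : Int) + 1) = (((off + 1 : Nat)) : Int) := by push_cast; ring
      simp only [pvLocs, pvParse, h, Bool.false_eq_true, if_false]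
      rw [hcast, ih', hslice]

-- ===== VERDICT (by name: the statement is the Claim_ definition above) =====
theorem cigar_str_to_pairs_spec : Claim_equal_cigar_str_to_pairs := by
  intro cigar _ _
  unfold Spec_cigar_str_to_pairs cigar_str_to_pairs cigar_str_to_pairs_alt
  dsimp only
  rw [PySem.List.foldl_append_if, locs_eq]
  simp only [List.nil_append]
  rw [PySem.List.foldl_append_singleton_eq_map]
  simp only [List.nil_append]
  have h := pairs_loop_eq_pvH cigar.toList (pvLocs 0 cigar.toList) (pvLocs 0 cigar.toList) 0 rfl
  simp only [Nat.cast_zero, lt_self_iff_false, if_false] at h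
  rw [h]
  have h0 := pvH_eq_parse cigar.toList cigar.toList 0 0 le_rfl rfl
  rw [slice_self] at h0
  simp only [Nat.cast_zero] at h0
  rw [h0, alt_eq_parse]
  simp
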